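-- pv_equiv track=rewrite | github.com/BaranIga/WDP_2025 | cwiczenia_08_z_zajec_dobrze.py | zamien_liter
-- ===== SOURCE A (Python) =====
-- def zamien_liter(wyraz):
--     zmieniony_wyraz = ""
--     liczba_zmian = 0
--
--     for i, znak in enumerate(wyraz):
--         if znak == 'a':
--             zmieniony_wyraz += 'A'
--             liczba_zmian += 1
--         elif znak == 'b':
--             zmieniony_wyraz += 'B'
--             liczba_zmian += 1
--         else:
--             zmieniony_wyraz += znak
--
--     if len(wyraz) % 2 != 0:
--         srodkowy_index = len(wyraz) // 2
--         srodkowy_znak = zmieniony_wyraz[srodkowy_index]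
--         if srodkowy_znak.isupper():
--             zmieniony_wyraz = (
--                 zmieniony_wyraz[:srodkowy_index] +
--                 srodkowy_znak.lower() +
--                 zmieniony_wyraz[srodkowy_index + 1:]
--             )
--             liczba_zmian += 1
--         else:
--             zmieniony_wyraz = (
--                     zmieniony_wyraz[:srodkowy_index] +
--                     srodkowy_znak.upper() +
--                     zmieniony_wyraz[srodkowy_index + 1:]
--             )
--             liczba_zmian += 1
--
--     return zmieniony_wyraz, liczba_zmian
-- ===== SOURCE B (Python) =====
-- def zamien_liter(wyraz):
--     zmieniony = wyraz.replace('a', 'A').replace('b', 'B')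
--     zmiany = wyraz.count('a') + wyraz.count('b')
--     if len(wyraz) % 2 != 0:
--         i = len(wyraz) // 2
--         c = zmieniony[i]
--         c = c.lower() if c.isupper() else c.upper()
--         zmieniony = zmieniony[:i] + c + zmieniony[i + 1:]
--         zmiany += 1
--     return zmieniony, zmiany
-- ===== Notes on version B (the rewrite author's own statement) =====
-- stated objective: simpler
-- what changed: Replaced the char-by-char accumulation loop with library replace/count calls for the a/b uppercasing plus a single slice-based middle-character fix-up.
import Mathlib
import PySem

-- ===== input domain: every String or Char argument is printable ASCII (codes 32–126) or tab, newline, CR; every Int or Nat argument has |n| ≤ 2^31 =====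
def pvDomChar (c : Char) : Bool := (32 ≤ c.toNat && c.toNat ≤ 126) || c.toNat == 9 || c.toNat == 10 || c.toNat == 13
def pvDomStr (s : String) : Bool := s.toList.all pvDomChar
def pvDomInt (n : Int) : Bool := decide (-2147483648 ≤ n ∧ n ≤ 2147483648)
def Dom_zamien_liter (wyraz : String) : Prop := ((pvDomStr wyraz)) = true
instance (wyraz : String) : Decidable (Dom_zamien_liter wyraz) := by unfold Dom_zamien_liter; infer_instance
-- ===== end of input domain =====

-- B replaces A's char-by-char accumulation loop by library replace/count calls
-- plus a single slice-based middle-character fix-up (objective: simpler).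


-- ===== PORT A =====
def zamien_liter (wyraz : String) : String × Int :=
  let cs := wyraz.toList
  let r := (PySem.List.enumerate cs).foldl
    (fun (acc : List Char × Int) (p : Int × Char) =>
      if p.2 = 'a' then (acc.1 ++ ['A'], acc.2 + 1)
      else if p.2 = 'b' then (acc.1 ++ ['B'], acc.2 + 1)
      else (acc.1 ++ [p.2], acc.2)) ([], 0)
  if PySem.Int.mod (cs.length : Int) 2 ≠ 0 then
    let i : Int := PySem.Int.floordiv (cs.length : Int) 2
    -- odd length ⇒ the middle index is always in range, the default ' ' is never used
    let c := PySem.List.pyGetD r.1 i ' '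
    if PySem.Chars.isupper c then
      (String.ofList (PySem.List.slice r.1 none (some i) ++ [PySem.Chars.lowerChar c] ++
                  PySem.List.slice r.1 (some (i + 1)) none), r.2 + 1)
    else
      (String.ofList (PySem.List.slice r.1 none (some i) ++ [PySem.Chars.upperChar c] ++
                  PySem.List.slice r.1 (some (i + 1)) none), r.2 + 1)
  else (String.ofList r.1, r.2)

-- ===== PORT B =====
def zamien_liter_alt (wyraz : String) : String × Int :=
  let cs := wyraz.toList
  let z := PySem.Chars.replace (PySem.Chars.replace cs ['a'] ['A']) ['b'] ['B']
  let n : Int := (PySem.Chars.count cs ['a'] : Int) + (PySem.Chars.count cs ['b'] : Int)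
  if PySem.Int.mod (cs.length : Int) 2 ≠ 0 then
    let i : Int := PySem.Int.floordiv (cs.length : Int) 2
    -- odd length ⇒ the middle index is always in range, the default ' ' is never used
    let c := PySem.List.pyGetD z i ' '
    let c' := if PySem.Chars.isupper c then PySem.Chars.lowerChar c else PySem.Chars.upperChar c
    (String.ofList (PySem.List.slice z none (some i) ++ [c'] ++
                PySem.List.slice z (some (i + 1)) none), n + 1)
  else (String.ofList z, n)

-- ===== PRECONDITION & SPEC =====
def Spec_zamien_liter (wyraz : String) (out : String × Int) : Prop := out = zamien_liter_alt wyraz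
instance (wyraz : String) (out : String × Int) : Decidable (Spec_zamien_liter wyraz out) := by unfold Spec_zamien_liter; infer_instance

-- ===== CLAIM (what is proved, stated in full; the proofs are below) =====
def Claim_equal_zamien_liter : Prop := ∀ (wyraz : String), Dom_zamien_liter wyraz → Spec_zamien_liter wyraz (zamien_liter wyraz)

-- ===== LEMMAS AND PROOFS =====

-- the per-character transformation A's loop performs
def pvF (c : Char) : Char := if c = 'a' then 'A' else if c = 'b' then 'B' else c

theorem pv_replace_go_single (o n : Char) :
    ∀ (fuel : Nat) (s acc : List Char), s.length ≤ fuel →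
      PySem.Chars.replace.go [o] [n] fuel s acc =
        acc.reverse ++ s.map (fun c => if c = o then n else c) := by
  intro fuel
  induction fuel with
  | zero => intro s acc h; cases s with
    | nil => simp [PySem.Chars.replace.go]
    | cons c t => simp at h
  | succ k ih =>
    intro s acc h
    cases s with
    | nil => simp [PySem.Chars.replace.go]
    | cons c t =>
      simp only [PySem.Chars.replace.go]
      by_cases hc : c = o
      · subst hc
        simp [List.isPrefixOf, ih t _ (by simpa using h)]
      · have : [o].isPrefixOf (c :: t) = false := by
          simp [List.isPrefixOf]; intro h'; exact absurd h'.symm hc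
        simp [this, ih t _ (by simpa using h), hc]

theorem pv_replace_single (s : List Char) (o n : Char) :
    PySem.Chars.replace s [o] [n] = s.map (fun c => if c = o then n else c) := by
  simpa [PySem.Chars.replace] using pv_replace_go_single o n s.length s [] le_rfl

theorem pv_count_go_single (o : Char) :
    ∀ (fuel : Nat) (s : List Char) (acc : Nat), s.length ≤ fuel →
      PySem.Chars.count.go [o] fuel s acc = acc + s.count o := by
  intro fuel
  induction fuel with
  | zero => intro s acc h; cases s with
    | nil => simp [PySem.Chars.count.go]
    | cons c t => simp at h
  | succ k ih =>
    intro s acc h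
    cases s with
    | nil => simp [PySem.Chars.count.go]
    | cons c t =>
      simp only [PySem.Chars.count.go]
      by_cases hc : c = o
      · subst hc
        simp [List.isPrefixOf, ih t _ (by simpa using h)]
        omega
      · have : [o].isPrefixOf (c :: t) = false := by
          simp [List.isPrefixOf]; intro h'; exact absurd h'.symm hc
        simp [this, ih t _ (by simpa using h), hc]

theorem pv_count_single (s : List Char) (o : Char) :
    PySem.Chars.count s [o] = s.count o := by
  simpa [PySem.Chars.count] using pv_count_go_single o s.length s 0 le_rfl

theorem pv_foldA (cs : List Char) :
    ∀ (s : Int) (z : List Char) (n : Int),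
      (PySem.List.enumerate cs s).foldl
        (fun (acc : List Char × Int) (p : Int × Char) =>
          if p.2 = 'a' then (acc.1 ++ ['A'], acc.2 + 1)
          else if p.2 = 'b' then (acc.1 ++ ['B'], acc.2 + 1)
          else (acc.1 ++ [p.2], acc.2)) (z, n) =
      (z ++ cs.map pvF, n + (cs.count 'a' : Int) + (cs.count 'b' : Int)) := by
  induction cs with
  | nil => intro s z n; simp [PySem.List.enumerate]
  | cons c t ih =>
    intro s z n
    rw [PySem.List.enumerate_cons]
    simp only [List.foldl_cons]
    by_cases ha : c = 'a'
    · subst ha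
      rw [ih]
      simp [pvF]
      omega
    · by_cases hb : c = 'b'
      · subst hb
        rw [if_neg (by simp), if_pos rfl]
        rw [ih]
        simp [pvF, ha]
        omega
      · rw [if_neg (by simpa using ha), if_neg (by simpa using hb)]
        rw [ih]
        simp [pvF, ha, hb]

theorem pv_map_chain (cs : List Char) :
    (cs.map (fun c => if c = 'a' then 'A' else c)).map (fun c => if c = 'b' then 'B' else c)
      = cs.map pvF := by
  rw [List.map_map]
  apply List.map_congr_left
  intro c _
  simp only [Function.comp, pvF]
  by_cases ha : c = 'a'
  · subst ha; decide
  · by_cases hb : c = 'b'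
    · subst hb; decide
    · simp [ha, hb]

-- ===== VERDICT (by name: the statement is the Claim_ definition above) =====
theorem zamien_liter_spec : Claim_equal_zamien_liter := by
  intro wyraz _
  unfold Spec_zamien_liter zamien_liter zamien_liter_alt
  dsimp only
  rw [pv_foldA, pv_replace_single, pv_replace_single, pv_map_chain,
      pv_count_single, pv_count_single]
  simp only [List.nil_append, zero_add]
  by_cases hodd : PySem.Int.mod (wyraz.toList.length : Int) 2 ≠ 0
  · rw [if_pos hodd, if_pos hodd]
    split_ifs <;> simp
  · rw [if_neg hodd, if_neg hodd]
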